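-- pv_equiv track=rewrite | github.com/myashok/LeetCode | 1649-maximum-number-of-non-overlapping-subarrays-with-sum-equals-target/solution.py | maxNonOverlapping
-- ===== SOURCE A (Python) =====
-- from typing import List
--
-- def maxNonOverlapping(nums: List[int], target: int) -> int:
--     n = len(nums)
--     if n == 1:
--         return nums[0] == target
--
--     res = curr_sum = 0
--     has_sum = {0: -1}
--     for i in range(n):
--         curr_sum += nums[i]
--         required_sum = curr_sum - target
--         if required_sum in has_sum:
--             res += 1
--             has_sum = {}
--             curr_sum = 0
--         has_sum[curr_sum] = res
--     return res
-- ===== SOURCE B (Python) =====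
-- def maxNonOverlapping(nums, target):
--     # Prefix-sum DP: best[p] = max count achievable at any index whose prefix sum is p.
--     dp = 0
--     prefix = 0
--     best = {0: 0}
--     for x in nums:
--         prefix += x
--         want = prefix - target
--         if want in best:
--             dp = max(dp, best[want] + 1)
--         best[prefix] = dp
--     return dp
-- ===== Notes on version B (the rewrite author's own statement) =====
-- stated objective: alternative
-- what changed: Replaced A's greedy reset-the-dict scan (res/curr_sum reset to zero at every match) with a prefix-sum dynamic program over a single global map from prefix sum to best count, with no resets and no special single-element case.
-- outside the precondition, e.g. on maxNonOverlapping([0], 1): A returns False, B returns 0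
import Mathlib
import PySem

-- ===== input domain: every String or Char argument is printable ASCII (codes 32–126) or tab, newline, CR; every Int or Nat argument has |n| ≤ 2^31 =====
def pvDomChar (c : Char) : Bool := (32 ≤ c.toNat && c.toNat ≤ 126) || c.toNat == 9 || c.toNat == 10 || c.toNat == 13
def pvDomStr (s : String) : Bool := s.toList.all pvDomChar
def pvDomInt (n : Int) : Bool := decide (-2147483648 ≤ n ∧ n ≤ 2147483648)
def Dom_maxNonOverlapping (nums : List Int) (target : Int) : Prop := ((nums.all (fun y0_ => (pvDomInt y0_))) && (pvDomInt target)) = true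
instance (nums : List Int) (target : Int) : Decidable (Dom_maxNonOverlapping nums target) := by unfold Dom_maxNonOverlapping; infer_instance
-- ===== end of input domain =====

-- B replaces A's greedy reset-the-dict scan by a prefix-sum DP over one global map (alternative algorithm, same cost).
-- Python's True/False returned on the single-element path is ported as 1/0 (bool is an int in Python).

-- ===== PORT A =====
-- one loop iteration of A: state (res, curr_sum, has_sum)
def maxNonOverlappingStepA (target : Int) (st : Int × Int × PySem.Dict Int Int) (x : Int) :
    Int × Int × PySem.Dict Int Int :=
  let c' := st.2.1 + x
  let req := c' - target
  if st.2.2.contains req then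
    -- res += 1; has_sum = {}; curr_sum = 0; has_sum[curr_sum] = res
    (st.1 + 1, 0, (PySem.Dict.empty).insert 0 (st.1 + 1))
  else
    (st.1, c', st.2.2.insert c' st.1)

def maxNonOverlapping (nums : List Int) (target : Int) : Int :=
  if nums.length = 1 then
    -- return nums[0] == target  (a Python bool, i.e. 1 or 0 as an int)
    match PySem.List.pyGet? nums 0 with
    | some v => if v = target then 1 else 0
    | none => 0
  else
    -- for i in range(n): curr_sum += nums[i]; …  — iteration over all of nums in order
    (nums.foldl (maxNonOverlappingStepA target) (0, 0, (PySem.Dict.empty).insert 0 (-1))).1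

-- ===== PORT B =====
-- one loop iteration of B: state (dp, prefix, best)
def maxNonOverlappingStepB (target : Int) (st : Int × Int × PySem.Dict Int Int) (x : Int) :
    Int × Int × PySem.Dict Int Int :=
  let p := st.2.1 + x
  let dp' :=
    match st.2.2.get? (p - target) with
    | some v => max st.1 (v + 1)
    | none => st.1
  (dp', p, st.2.2.insert p dp')

def maxNonOverlapping_alt (nums : List Int) (target : Int) : Int :=
  (nums.foldl (maxNonOverlappingStepB target) (0, 0, (PySem.Dict.empty).insert 0 0)).1

-- ===== PRECONDITION & SPEC =====
-- Pre_ excludes single-element lists, on which A returns a Python bool (True/False), not an int.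
def Pre_maxNonOverlapping (nums : List Int) (target : Int) : Prop := nums.length ≠ 1
instance (nums : List Int) (target : Int) : Decidable (Pre_maxNonOverlapping nums target) := by unfold Pre_maxNonOverlapping; infer_instance
def pvWitness_maxNonOverlapping : List Int × Int := ([2, 1, 3, 3], 3)

def Spec_maxNonOverlapping (nums : List Int) (target : Int) (out : Int) : Prop := out = maxNonOverlapping_alt nums target
instance (nums : List Int) (target : Int) (out : Int) : Decidable (Spec_maxNonOverlapping nums target out) := by unfold Spec_maxNonOverlapping; infer_instance

-- ===== CLAIM (what is proved, stated in full; the proofs are below) =====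
def Claim_equal_maxNonOverlapping : Prop := ∀ (nums : List Int) (target : Int), Dom_maxNonOverlapping nums target → Pre_maxNonOverlapping nums target → Spec_maxNonOverlapping nums target (maxNonOverlapping nums target)

-- ===== LEMMAS AND PROOFS =====

-- Relation between A's state (r, c, h) and B's state (d, s, m):
-- counts agree; every sum in the current greedy window (shifted by the base s - c) is in the
-- map with value r; and every map value is ≤ r, reaching r only on the current window.
def MnoRel (r c : Int) (h : PySem.Dict Int Int) (d s : Int) (m : PySem.Dict Int Int) : Prop :=
  d = r ∧
  (∀ w : Int, h.contains w = true → m.get? (s - c + w) = some r) ∧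
  (∀ p v : Int, m.get? p = some v → v ≤ r ∧ (v = r → h.contains (p - (s - c)) = true))

lemma mnoRel_step (t r c : Int) (h : PySem.Dict Int Int) (d s : Int) (m : PySem.Dict Int Int)
    (x : Int) (hrel : MnoRel r c h d s m) :
    MnoRel (maxNonOverlappingStepA t (r, c, h) x).1 (maxNonOverlappingStepA t (r, c, h) x).2.1
      (maxNonOverlappingStepA t (r, c, h) x).2.2
      (maxNonOverlappingStepB t (d, s, m) x).1 (maxNonOverlappingStepB t (d, s, m) x).2.1
      (maxNonOverlappingStepB t (d, s, m) x).2.2 := by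
  obtain ⟨hd, hwin, hub⟩ := hrel
  subst hd
  by_cases hc : h.contains (c + x - t) = true
  · -- greedy matches: B's lookup finds value d, dp becomes d + 1
    have hget : m.get? (s + x - t) = some d := by
      have := hwin (c + x - t) hc
      have harith : s - c + (c + x - t) = s + x - t := by ring
      rwa [harith] at this
    simp only [maxNonOverlappingStepA, maxNonOverlappingStepB, hc, if_pos]
    refine ⟨?_, ?_, ?_⟩
    · simp [hget]
    · intro w hw
      simp only [PySem.Dict.contains_insert, PySem.Dict.contains_empty, Bool.or_false,
        beq_iff_eq] at hw
      have : m.get? (s + x - t) = some d := hget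
      simp only [hget]
      subst hw
      have hm : max d (d + 1) = d + 1 := by omega
      rw [hm]
      have : s + x - 0 + 0 = s + x := by ring
      rw [this, PySem.Dict.get?_insert_self]
    · intro p v hp
      simp only [hget] at hp
      have hm : max d (d + 1) = d + 1 := by omega
      rw [hm] at hp
      rw [PySem.Dict.get?_insert] at hp
      split_ifs at hp with hps
      · obtain hv : v = d + 1 := by injection hp with hh; omega
        subst hv; subst hps
        refine ⟨le_refl _, fun _ => ?_⟩
        have : s + x - (s + x - 0) = 0 := by ring
        rw [this, PySem.Dict.contains_insert_self]
      · have := hub p v hp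
        constructor
        · omega
        · intro hv; omega
  · -- no greedy match: any map hit has value < d, dp stays d
    have hcf : h.contains (c + x - t) = false := by
      cases hcc : h.contains (c + x - t) with
      | false => rfl
      | true => exact absurd hcc hc
    have hdp : (match m.get? (s + x - t) with
        | some v => max d (v + 1)
        | none => d) = d := by
      cases hg : m.get? (s + x - t) with
      | none => rfl
      | some v =>
        have ⟨hle, hr⟩ := hub (s + x - t) v hg
        have hvlt : v < d := by
          rcases lt_or_eq_of_le hle with h1 | h1
          · exact h1
          · exfalso
            have := hr h1
            have harith : s + x - t - (s - c) = c + x - t := by ring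
            rw [harith] at this
            rw [this] at hcf; exact Bool.noConfusion hcf
        simp [max_def]; omega
    simp only [maxNonOverlappingStepA, maxNonOverlappingStepB, hcf, Bool.false_eq_true,
      if_false]
    rw [hdp]
    refine ⟨rfl, ?_, ?_⟩
    · intro w hw
      rw [PySem.Dict.contains_insert] at hw
      rw [PySem.Dict.get?_insert]
      split_ifs with hps
      · rfl
      · rcases Bool.or_eq_true_iff.mp hw with h1 | h1
        · exfalso
          have hwc : w = c + x := by exact beq_iff_eq.mp h1
          apply hps
          rw [hwc]; ring
        · have := hwin w h1
          have harith : s + x - (c + x) + w = s - c + w := by ring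
          rw [harith]; exact this
    · intro p v hp
      rw [PySem.Dict.get?_insert] at hp
      split_ifs at hp with hps
      · obtain hv : v = d := by injection hp with hh; omega
        subst hv; subst hps
        refine ⟨le_refl _, fun _ => ?_⟩
        have : s + x - (s + x - (c + x)) = c + x := by ring
        rw [this, PySem.Dict.contains_insert_self]
      · have ⟨h1, h2⟩ := hub p v hp
        refine ⟨h1, fun hv => ?_⟩
        rw [PySem.Dict.contains_insert]
        have := h2 hv
        have harith : p - (s + x - (c + x)) = p - (s - c) := by ring
        rw [harith, this, Bool.or_true]

lemma mnoLoop_eq (t : Int) : ∀ (l : List Int) (r c : Int) (h : PySem.Dict Int Int)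
    (d s : Int) (m : PySem.Dict Int Int), MnoRel r c h d s m →
    (l.foldl (maxNonOverlappingStepB t) (d, s, m)).1 =
      (l.foldl (maxNonOverlappingStepA t) (r, c, h)).1 := by
  intro l
  induction l with
  | nil => intro r c h d s m hrel; exact hrel.1
  | cons x tl ih =>
    intro r c h d s m hrel
    have hstep := mnoRel_step t r c h d s m x hrel
    simp only [List.foldl_cons]
    exact ih _ _ _ _ _ _ hstep

lemma mnoRel_init : MnoRel 0 0 ((PySem.Dict.empty).insert 0 (-1)) 0 0
    ((PySem.Dict.empty).insert 0 0) := by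
  refine ⟨rfl, ?_, ?_⟩
  · intro w hw
    rw [PySem.Dict.contains_insert, PySem.Dict.contains_empty, Bool.or_false,
      beq_iff_eq] at hw
    subst hw
    simp
  · intro p v hp
    rw [PySem.Dict.get?_insert, PySem.Dict.get?_empty] at hp
    split_ifs at hp with hps
    · obtain hv : v = 0 := by injection hp with hh; omega
      subst hv; subst hps
      refine ⟨le_refl _, fun _ => ?_⟩
      simp

-- ===== VERDICT (by name: the statement is the Claim_ definition above) =====
theorem maxNonOverlapping_spec : Claim_equal_maxNonOverlapping := by
  intro nums target _ hlen
  unfold Spec_maxNonOverlapping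
  unfold maxNonOverlapping maxNonOverlapping_alt
  rw [if_neg hlen]
  exact (mnoLoop_eq target nums 0 0 _ 0 0 _ mnoRel_init).symm
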